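-- pv_equiv track=rewrite | github.com/jousepandrex/python | solutions.py | prob_17
-- ===== SOURCE A (Python) =====
-- def prob_17(n1, n2):
--     ar = []
--     for i in range(2, n1):
--         if n1%i == 0:
--             ar.append(i)
--
--     for i in range(2, n2):
--         if n2%i == 0 and i in ar:
--             return False
--
--     return True
-- ===== SOURCE B (Python) =====
-- def prob_17(n1, n2):
--     for d in range(2, min(n1, n2)):
--         if n1 % d == 0 and n2 % d == 0:
--             return False
--     return True
-- ===== Notes on version B (the rewrite author's own statement) =====
-- stated objective: simpler
-- what changed: B drops A's intermediate divisor list and its second membership-scanning pass: one direct loop over range(2, min(n1, n2)) tests divisibility of both numbers at once.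
import Mathlib
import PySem

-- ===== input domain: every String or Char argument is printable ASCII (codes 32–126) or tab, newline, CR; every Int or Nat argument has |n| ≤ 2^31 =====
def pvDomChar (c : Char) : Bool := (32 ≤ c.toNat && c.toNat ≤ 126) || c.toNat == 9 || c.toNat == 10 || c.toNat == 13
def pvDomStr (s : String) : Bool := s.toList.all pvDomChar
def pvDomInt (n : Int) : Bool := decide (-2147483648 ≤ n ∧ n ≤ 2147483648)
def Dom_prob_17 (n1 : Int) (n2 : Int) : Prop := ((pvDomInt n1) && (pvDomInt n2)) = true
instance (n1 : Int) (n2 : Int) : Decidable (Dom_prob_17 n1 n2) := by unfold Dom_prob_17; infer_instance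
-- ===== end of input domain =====

-- ===== PORT A =====
-- A: builds the list 'ar' of proper divisors of n1, then scans range(2, n2) and
-- returns False at the first i dividing n2 that is also in 'ar'.
def prob_17 (n1 : Int) (n2 : Int) : Bool :=
  let ar := (PySem.List.pyRange 2 n1 1).foldl
    (fun acc i => if PySem.Int.mod n1 i == 0 then acc ++ [i] else acc) []
  !((PySem.List.pyRange 2 n2 1).any
      (fun i => PySem.Int.mod n2 i == 0 && ar.contains i))

-- ===== PORT B =====
-- B (simpler): no intermediate list — one direct loop over range(2, min(n1, n2))
-- testing divisibility of both numbers; return-value equivalence proved below.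
def prob_17_alt (n1 : Int) (n2 : Int) : Bool :=
  !((PySem.List.pyRange 2 (min n1 n2) 1).any
      (fun d => PySem.Int.mod n1 d == 0 && PySem.Int.mod n2 d == 0))

-- ===== PRECONDITION & SPEC =====
def Spec_prob_17 (n1 : Int) (n2 : Int) (out : Bool) : Prop := out = prob_17_alt n1 n2
instance (n1 : Int) (n2 : Int) (out : Bool) : Decidable (Spec_prob_17 n1 n2 out) := by unfold Spec_prob_17; infer_instance

-- ===== CLAIM (what is proved, stated in full; the proofs are below) =====
def Claim_equal_prob_17 : Prop := ∀ (n1 : Int) (n2 : Int), Dom_prob_17 n1 n2 → Spec_prob_17 n1 n2 (prob_17 n1 n2)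

-- ===== LEMMAS AND PROOFS =====
-- the common-divisor scan of A (over divisors of n1 collected in 'ar') finds a hit
-- iff B's single scan up to min(n1, n2) does
theorem key (n1 n2 : Int) :
    ((PySem.List.pyRange 2 n2 1).any
      (fun i => PySem.Int.mod n2 i == 0 &&
        ((PySem.List.pyRange 2 n1 1).filter (fun i => PySem.Int.mod n1 i == 0)).contains i))
    =
    ((PySem.List.pyRange 2 (min n1 n2) 1).any
      (fun d => PySem.Int.mod n1 d == 0 && PySem.Int.mod n2 d == 0)) := by
  rcases Bool.eq_false_or_eq_true ((PySem.List.pyRange 2 (min n1 n2) 1).any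
      (fun d => PySem.Int.mod n1 d == 0 && PySem.Int.mod n2 d == 0)) with h | h <;> rw [h]
  · simp only [List.any_eq_true] at h ⊢
    obtain ⟨d, hd, hp⟩ := h
    rw [PySem.List.mem_pyRange_one] at hd
    simp only [Bool.and_eq_true, beq_iff_eq] at hp
    refine ⟨d, ?_, ?_⟩
    · rw [PySem.List.mem_pyRange_one]; omega
    · simp only [List.contains_eq_mem, List.mem_filter, PySem.List.mem_pyRange_one,
        Bool.and_eq_true, decide_eq_true_eq, beq_iff_eq]
      exact ⟨hp.2, ⟨by omega, by omega⟩, hp.1⟩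
  · simp only [List.any_eq_false] at h ⊢
    intro i hi
    rw [PySem.List.mem_pyRange_one] at hi
    simp only [List.contains_eq_mem, List.mem_filter, PySem.List.mem_pyRange_one,
      Bool.and_eq_true, decide_eq_true_eq, beq_iff_eq] at *
    intro hcon
    exact h i ⟨by omega, by omega⟩ ⟨hcon.2.2, hcon.1⟩

-- ===== VERDICT (by name: the statement is the Claim_ definition above) =====
theorem prob_17_spec : Claim_equal_prob_17 := by
  intro n1 n2 _
  unfold Spec_prob_17
  simp only [prob_17, prob_17_alt, PySem.List.foldl_append_if_eq_filter, List.nil_append, key]
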